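-- pv_equiv track=rewrite | github.com/Sorebit/adventofcode | 2025/07.py | part_two_single_row
-- ===== SOURCE A (Python) =====
-- from collections import defaultdict
--
-- START = "S"
--
-- SPLITTER = "^"
--
-- def part_two_single_row(line, beams, level):
--     beams_for_next_lv = defaultdict(set)
--     for x, c in enumerate(line):
--         if c == START:
--             beams_for_next_lv[x] = set()  # w sensie ze root
--             break  # assuming theres only one start
--
--         if x in beams:
--             if c == SPLITTER:
--                 beams_for_next_lv[x - 1].add(x)
--                 beams_for_next_lv[x + 1].add(x)
--             else:
--                 beams_for_next_lv[x].add(x)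
--
--     return beams_for_next_lv
-- ===== SOURCE B (Python) =====
-- from collections import defaultdict
--
-- START = "S"
--
-- SPLITTER = "^"
--
-- def part_two_single_row(line, beams, level):
--     # Locate the root once; only positions strictly before it matter.
--     start = line.find(START)
--     cutoff = len(line) if start == -1 else start
--     beams_for_next_lv = defaultdict(set)
--     # Iterate over the relevant beam positions directly (sorted, deduplicated)
--     # instead of scanning every cell of the line and testing membership.
--     for x in sorted({b for b in beams if 0 <= b < cutoff}):
--         c = line[x]
--         if c == SPLITTER:
--             beams_for_next_lv[x - 1].add(x)
--             beams_for_next_lv[x + 1].add(x)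
--         else:
--             beams_for_next_lv[x].add(x)
--     if start != -1:
--         beams_for_next_lv[start] = set()  # the root row overwrites any split landing there
--     return beams_for_next_lv
-- ===== Notes on version B (the rewrite author's own statement) =====
-- stated objective: alternative
-- what changed: B locates the root once with line.find and then iterates only over the sorted deduplicated in-range beam positions, instead of scanning every cell of the line (with an early break at the root) and testing each position for list membership in beams.
import Mathlib
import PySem

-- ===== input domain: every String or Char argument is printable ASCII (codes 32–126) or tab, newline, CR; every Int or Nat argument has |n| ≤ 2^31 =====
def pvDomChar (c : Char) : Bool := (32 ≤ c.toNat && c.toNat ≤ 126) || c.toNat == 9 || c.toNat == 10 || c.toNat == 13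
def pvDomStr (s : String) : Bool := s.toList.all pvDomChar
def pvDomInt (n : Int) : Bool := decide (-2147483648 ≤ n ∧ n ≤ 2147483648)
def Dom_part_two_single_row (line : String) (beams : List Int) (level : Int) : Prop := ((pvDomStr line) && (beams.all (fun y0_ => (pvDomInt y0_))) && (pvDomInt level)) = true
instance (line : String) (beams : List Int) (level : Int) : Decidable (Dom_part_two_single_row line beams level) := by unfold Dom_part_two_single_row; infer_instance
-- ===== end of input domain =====

-- B iterates directly over the (sorted, deduplicated, in-range) beam positions after
-- locating the root once with line.find, instead of scanning every cell of the line
-- with a per-cell list-membership test; objective: alternative decomposition.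

-- routing of one beam at position x reading character c (shared text of both Pythons:
-- 'if c == SPLITTER: d[x-1].add(x); d[x+1].add(x) else: d[x].add(x)' on a defaultdict(set))
def pvRoute (d : PySem.Dict Int (PySem.Set Int)) (x : Int) (c : Char) : PySem.Dict Int (PySem.Set Int) :=
  if c = '^' then
    (PySem.Dict.modify (PySem.Dict.modify d (x - 1) [] (fun s => PySem.Set.add s x)) (x + 1) [] (fun s => PySem.Set.add s x))
  else
    PySem.Dict.modify d x [] (fun s => PySem.Set.add s x)

-- ===== PORT A =====
-- A's per-cell body after the START check: 'if x in beams: …'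
def pvAStep (beams : List Int) (d : PySem.Dict Int (PySem.Set Int)) (x : Int) (c : Char) : PySem.Dict Int (PySem.Set Int) :=
  if beams.contains x then pvRoute d x c else d

-- A's 'for x, c in enumerate(line)' with the break at START
def pvALoop (beams : List Int) : List Char → Int → PySem.Dict Int (PySem.Set Int) → PySem.Dict Int (PySem.Set Int)
  | [], _, d => d
  | c :: cs, x, d =>
    if c = 'S' then PySem.Dict.insert d x []
    else pvALoop beams cs (x + 1) (pvAStep beams d x c)

def part_two_single_row (line : String) (beams : List Int) (level : Int) : List (Int × List Int) :=
  (pvALoop beams line.toList 0 PySem.Dict.empty).items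

-- ===== PORT B =====
def part_two_single_row_alt (line : String) (beams : List Int) (level : Int) : List (Int × List Int) :=
  let start : Int := PySem.Str.find line "S"
  let cutoff : Int := if start = -1 then (line.toList.length : Int) else start
  let xs : List Int := PySem.List.sorted (PySem.Set.ofList (beams.filter (fun b => decide (0 ≤ b) && decide (b < cutoff)))) (fun x => x) false
  let d : PySem.Dict Int (PySem.Set Int) :=
    xs.foldl (fun d x => pvRoute d x (PySem.List.pyGetD line.toList x ' ')) PySem.Dict.empty
  (if start ≠ -1 then PySem.Dict.insert d start [] else d).items

-- ===== PRECONDITION & SPEC =====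
def Spec_part_two_single_row (line : String) (beams : List Int) (level : Int) (out : List (Int × List Int)) : Prop := out = part_two_single_row_alt line beams level
instance (line : String) (beams : List Int) (level : Int) (out : List (Int × List Int)) : Decidable (Spec_part_two_single_row line beams level out) := by unfold Spec_part_two_single_row; infer_instance

-- ===== CLAIM (what is proved, stated in full; the proofs are below) =====
def Claim_equal_part_two_single_row : Prop := ∀ (line : String) (beams : List Int) (level : Int), Dom_part_two_single_row line beams level → Spec_part_two_single_row line beams level (part_two_single_row line beams level)

-- ===== LEMMAS AND PROOFS =====

theorem pvALoop_noS (beams : List Int) (cs : List Char) (x0 : Int) (d : PySem.Dict Int (PySem.Set Int))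
    (h : 'S' ∉ cs) :
    pvALoop beams cs x0 d = (PySem.List.enumerate cs x0).foldl (fun d p => pvAStep beams d p.1 p.2) d := by
  induction cs generalizing x0 d with
  | nil => simp [pvALoop, PySem.List.enumerate_nil]
  | cons c cs ih =>
    simp only [List.mem_cons, not_or] at h
    simp [pvALoop, PySem.List.enumerate_cons, Ne.symm h.1, ih _ _ h.2]

theorem pvALoop_S (beams : List Int) (pre rest : List Char) (x0 : Int) (d : PySem.Dict Int (PySem.Set Int))
    (h : 'S' ∉ pre) :
    pvALoop beams (pre ++ 'S' :: rest) x0 d =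
      PySem.Dict.insert ((PySem.List.enumerate pre x0).foldl (fun d p => pvAStep beams d p.1 p.2) d) (x0 + pre.length) [] := by
  induction pre generalizing x0 d with
  | nil => simp [pvALoop, PySem.List.enumerate_nil]
  | cons c cs ih =>
    simp only [List.mem_cons, not_or] at h
    simp only [List.cons_append, pvALoop, if_neg (Ne.symm h.1), PySem.List.enumerate_cons, List.foldl_cons]
    rw [ih _ _ h.2]
    have : x0 + 1 + (cs.length : Int) = x0 + ((c :: cs).length : Int) := by
      push_cast [List.length_cons]; ring
    rw [this]

-- the core: A's filtered scan over a root-free prefix equals B's fold over the sorted beams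
theorem pvCore (L pre : List Char) (beams : List Int) (hp : pre <+: L) :
    (PySem.List.enumerate pre 0).foldl (fun d p => pvAStep beams d p.1 p.2) PySem.Dict.empty =
    (PySem.List.sorted (PySem.Set.ofList (beams.filter (fun b => decide (0 ≤ b) && decide (b < (pre.length : Int))))) (fun x => x) false).foldl
      (fun d x => pvRoute d x (PySem.List.pyGetD L x ' ')) PySem.Dict.empty := by
  classical
  set ys : List (Int × Char) := (PySem.List.enumerate pre 0).filter (fun p => beams.contains p.1) with hys
  -- A's fold skips non-beam cells: it is the fold over the filtered enumeration
  have h1 : (PySem.List.enumerate pre 0).foldl (fun d p => pvAStep beams d p.1 p.2) PySem.Dict.empty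
      = ys.foldl (fun d p => pvRoute d p.1 p.2) PySem.Dict.empty := by
    rw [hys, List.foldl_filter]
    simp only [pvAStep]
  -- every pair of ys is (k, pre[k]) and pre is a prefix of L
  have hpair : ∀ p ∈ ys, (p.1, PySem.List.pyGetD L p.1 ' ') = p := by
    intro p hpy
    have hpe := (List.mem_filter.mp hpy).1
    obtain ⟨k, hk, rfl⟩ := (PySem.List.mem_enumerate_iff pre 0 p).mp hpe
    have hkL : k < L.length := lt_of_lt_of_le hk hp.length_le
    have hLk : L[k] = pre[k] := (List.IsPrefix.getElem hp hk).symm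
    simp only [Prod.mk.injEq, zero_add, true_and]
    rw [PySem.List.pyGetD_natCast, List.getD_eq_getElem L ' ' hkL]
    exact hLk
  -- ys is strictly increasing in its first components
  have hpw : ys.Pairwise (fun p q => p.1 < q.1) :=
    List.Pairwise.filter _ (PySem.List.pairwise_lt_enumerate pre 0)
  have hpwf : (ys.map Prod.fst).Pairwise (· < ·) := (List.pairwise_map).mpr hpw
  -- the sorted deduplicated beam list is exactly the first components of ys
  have hperm : (ys.map Prod.fst).Perm (PySem.Set.ofList (beams.filter (fun b => decide (0 ≤ b) && decide (b < (pre.length : Int))))) := by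
    refine (List.perm_ext_iff_of_nodup (hpwf.imp ne_of_lt) (PySem.Set.nodup_ofList _)).mpr ?_
    intro x
    simp only [List.mem_map, hys, List.mem_filter, PySem.Set.mem_ofList,
      PySem.List.mem_enumerate_iff]
    constructor
    · rintro ⟨⟨a, c⟩, ⟨⟨k, hk, hek⟩, hcont⟩, rfl⟩
      obtain ⟨rfl, rfl⟩ := Prod.mk.injEq .. ▸ hek
      refine ⟨by simpa using hcont, by simp; omega⟩
    · rintro ⟨hxb, hq⟩
      simp only [Bool.and_eq_true, decide_eq_true_eq] at hq
      obtain ⟨hx0, hxlt⟩ := hq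
      refine ⟨(x, pre[x.toNat]'(by omega)), ⟨⟨x.toNat, by omega, by simp [hx0]⟩, by simpa using hxb⟩, rfl⟩
  have hsorted : PySem.List.sorted (PySem.Set.ofList (beams.filter (fun b => decide (0 ≤ b) && decide (b < (pre.length : Int))))) (fun x => x) false = ys.map Prod.fst :=
    PySem.List.sorted_eq_of_perm_of_pairwise_lt _ _ (fun x => x) hperm hpwf
  rw [h1, hsorted, List.foldl_map]
  refine (PySem.List.foldl_congr_mem ys _ _ PySem.Dict.empty ?_).symm
  intro d p hpmem
  rw [show PySem.List.pyGetD L p.1 ' ' = p.2 from congrArg Prod.snd (hpair p hpmem)]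


-- ===== VERDICT (by name: the statement is the Claim_ definition above) =====
theorem part_two_single_row_spec : Claim_equal_part_two_single_row := by
  intro line beams level _hdom
  unfold Spec_part_two_single_row part_two_single_row part_two_single_row_alt
  have hS : ("S" : String).toList = ['S'] := by decide
  have hfindeq : PySem.Str.find line "S" = PySem.Chars.find line.toList ['S'] := by
    rw [PySem.Str.find_eq, hS]
  by_cases hfind : PySem.Chars.find line.toList ['S'] = -1
  · -- no 'S' in the line: the whole line is scanned, no root insert
    have hnoS : 'S' ∉ line.toList := by
      intro hm
      obtain ⟨s, t, hst⟩ := List.append_of_mem hm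
      exact ((PySem.Chars.find_eq_neg_one_iff _ _).mp hfind) ⟨s, t, by rw [hst]; simp⟩
    rw [pvALoop_noS _ _ _ _ hnoS,
      pvCore line.toList line.toList beams (List.prefix_refl _)]
    simp only [hfindeq, hfind, ne_eq, not_true_eq_false, if_false, reduceIte]
  · -- 'S' found at index n = k: scan the prefix before it, then insert the root
    have h0 : 0 ≤ PySem.Chars.find line.toList ['S'] := by
      have := PySem.Chars.neg_one_le_find line.toList ['S']
      omega
    obtain ⟨hpref, hmin⟩ := PySem.Chars.find_spec h0
    set k : Nat := (PySem.Chars.find line.toList ['S']).toNat with hkdef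
    obtain ⟨t, ht⟩ := hpref
    have hdk : line.toList.drop k = 'S' :: t := by rw [← ht]; rfl
    have hkL : k < line.toList.length := by
      have h1 : (line.toList.drop k).length = t.length + 1 := by rw [hdk]; simp
      have h2 : (line.toList.drop k).length = line.toList.length - k := by simp
      omega
    have hcd := List.getElem_cons_drop hkL
    rw [hdk] at hcd
    obtain ⟨hLk, hdrop⟩ := List.cons.inj hcd.symm
    have hdecomp : line.toList = line.toList.take k ++ 'S' :: line.toList.drop (k + 1) := by
      conv_lhs => rw [← List.take_append_drop k line.toList, hdk]
      rw [hdrop]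
    have hnoS : 'S' ∉ line.toList.take k := by
      intro hm
      obtain ⟨i, hi, hSi⟩ := List.mem_iff_getElem.mp hm
      have hik : i < k := by
        have h' := hi
        simp [List.length_take] at h'
        omega
      have hiL : i < line.toList.length := by omega
      have hLi : line.toList[i] = 'S' :=
        ((List.take_prefix k line.toList).getElem hi).symm.trans hSi
      refine hmin i hik ⟨line.toList.drop (i + 1), ?_⟩
      rw [show ['S'] ++ line.toList.drop (i + 1) = 'S' :: line.toList.drop (i + 1) from rfl,
        ← hLi, List.getElem_cons_drop hiL]
    have hlen : ((line.toList.take k).length : Int) = PySem.Chars.find line.toList ['S'] := by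
      rw [List.length_take]
      omega
    conv_lhs => rw [hdecomp]
    rw [pvALoop_S _ _ _ _ _ hnoS,
      pvCore line.toList (line.toList.take k) beams (List.take_prefix k line.toList), hlen]
    simp only [hfindeq, ne_eq, hfind, not_false_eq_true, if_pos, reduceIte, zero_add]
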